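-- pv_equiv track=rewrite | github.com/codemotozu/Documented_Speak_and_Translate_App | server/app/application/services/tts_service.py | _generate_sentence_section
-- ===== SOURCE A (Python) =====
-- def _generate_sentence_section( # Defines method to generate a sentence section. # Definiert Methode zur Generierung eines Satzabschnitts.
--
--     sentence: str, # The sentence text. # Der Satztext.
--     word_pairs: list[tuple[str, str]], # Word pairs for translation. # Wortpaare für Übersetzung.
--     voice: str, # Voice to use. # Zu verwendende Stimme.
--     lang: str, # Language code. # Sprachcode.
-- ) -> str: # Returns SSML string section. # Gibt SSML-Zeichenkettenabschnitt zurück.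
--     if not sentence: # Checks if sentence is empty. # Prüft, ob Satz leer ist.
--         return "" # Returns empty string for empty input. # Gibt leere Zeichenkette für leere Eingabe zurück.
--
--     # Generate the main sentence SSML
--     ssml = f"""
--         <voice name="{voice}">
--             <prosody rate="1.0">
--                 <lang xml:lang="{lang}">{sentence}</lang>
--                 <break time="1000ms"/>
--             </prosody>
--         </voice>""" # Creates section for full sentence. # Erstellt Abschnitt für vollständigen Satz.
--
--     if word_pairs: # Checks if word pairs are provided. # Prüft, ob Wortpaare bereitgestellt werden.
--         ssml += """
--             <voice name="en-US-JennyMultilingualNeural">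
--                 <prosody rate="0.8">""" # Starts word-by-word breakdown with slower speech. # Startet Wort-für-Wort-Aufschlüsselung mit langsamerer Sprache.
--
--         # Create phrase map and sort by phrase length (longest first)
--         phrase_map = {src.lower(): (src, tgt) for src, tgt in word_pairs} # Creates mapping of lowercase source to original pairs. # Erstellt Zuordnung von Kleinbuchstaben-Quelle zu Original-Paaren.
--         phrases = sorted( # Sorts phrases by word count (longest first). # Sortiert Phrasen nach Wortzahl (längste zuerst).
--             phrase_map.keys(), key=lambda x: len(x.split()), reverse=True # Sort key is word count in descending order. # Sortierschlüssel ist Wortzahl in absteigender Reihenfolge.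
--         )
--         words = sentence.split() # Splits sentence into words. # Teilt Satz in Wörter.
--         index = 0 # Initializes word index. # Initialisiert Wortindex.
--
--         while index < len(words): # Loops through all words in sentence. # Schleife durch alle Wörter im Satz.
--             matched = False # Tracks if current position matched a phrase. # Verfolgt, ob aktuelle Position einer Phrase entspricht.
--
--             # Try to match multi-word phrases first
--             for phrase_key in phrases: # Checks each potential phrase. # Prüft jede potenzielle Phrase.
--                 phrase_words = phrase_key.split() # Splits phrase into words. # Teilt Phrase in Wörter.
--                 phrase_len = len(phrase_words) # Gets phrase length in words. # Holt Phrasenlänge in Wörtern.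
--
--                 if index + phrase_len <= len(words): # Checks if phrase would fit in remaining words. # Prüft, ob Phrase in verbleibende Wörter passen würde.
--                     current_phrase = " ".join( # Constructs candidate phrase from sentence words. # Konstruiert Kandidatenphrase aus Satzwörtern.
--                         words[index : index + phrase_len] # Takes slice of words of phrase length. # Nimmt Ausschnitt von Wörtern der Phrasenlänge.
--                     ).lower() # Converts to lowercase for comparison. # Konvertiert für Vergleich in Kleinbuchstaben.
--                     if current_phrase == phrase_key: # Checks if candidate matches known phrase. # Prüft, ob Kandidat mit bekannter Phrase übereinstimmt.
--                         original_phrase, translation = phrase_map[phrase_key] # Gets original phrase and translation. # Holt Originalphrase und Übersetzung.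
--                         ssml += f"""
--                             <lang xml:lang="{lang}">{original_phrase}</lang>
--                             <break time="300ms"/>
--                             <lang xml:lang="es-ES">{translation}</lang>
--                             <break time="500ms"/>""" # Adds phrase with translation to SSML. # Fügt Phrase mit Übersetzung zum SSML hinzu.
--                         index += phrase_len # Advances index past phrase. # Verschiebt Index über Phrase hinaus.
--                         matched = True # Marks as matched. # Markiert als übereinstimmend.
--                         break # Exits phrase search loop. # Beendet Phrasen-Suchschleife.
--
--             # Fallback to single-word matching
--             if not matched: # If no phrase matched at current position. # Wenn keine Phrase an aktueller Position übereinstimmt.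
--                 current_word = words[index].strip(".,!?").lower() # Gets current word without punctuation, lowercase. # Holt aktuelles Wort ohne Interpunktion, in Kleinbuchstaben.
--                 original_word = words[index] # Keeps original word with punctuation. # Behält Originalwort mit Interpunktion.
--                 translation = next( # Finds matching translation for this word. # Findet passende Übersetzung für dieses Wort.
--                     (tgt for src, tgt in word_pairs if src.lower() == current_word), # Searches case-insensitively. # Sucht unabhängig von Groß-/Kleinschreibung.
--                     None, # Default to None if no match found. # Standardmäßig None, wenn keine Übereinstimmung gefunden.
--                 )
--
--                 ssml += f"""
--                     <lang xml:lang="{lang}">{original_word}</lang>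
--                     <break time="300ms"/>""" # Adds word to SSML. # Fügt Wort zum SSML hinzu.
--                 if translation: # If translation was found. # Wenn Übersetzung gefunden wurde.
--                     ssml += f"""
--                         <lang xml:lang="es-ES">{translation}</lang>
--                         <break time="500ms"/>""" # Adds translation to SSML. # Fügt Übersetzung zum SSML hinzu.
--                 else: # If no translation was found. # Wenn keine Übersetzung gefunden wurde.
--                     ssml += """<break time="500ms"/>""" # Adds pause only. # Fügt nur Pause hinzu.
--
--                 index += 1 # Advances to next word. # Verschiebt zu nächstem Wort.
--
--         ssml += """
--                     <break time="1000ms"/>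
--                 </prosody>
--             </voice>""" # Closes word-by-word section. # Schließt Wort-für-Wort-Abschnitt.
--
--     return ssml # Returns the complete section. # Gibt den vollständigen Abschnitt zurück.
-- ===== SOURCE B (Python) =====
-- def _generate_sentence_section(
--     sentence: str,
--     word_pairs: list[tuple[str, str]],
--     voice: str,
--     lang: str,
-- ) -> str:
--     if not sentence:
--         return ""
--
--     parts = [f"""
--         <voice name="{voice}">
--             <prosody rate="1.0">
--                 <lang xml:lang="{lang}">{sentence}</lang>
--                 <break time="1000ms"/>
--             </prosody>
--         </voice>"""]
--
--     if word_pairs: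
--         parts.append("""
--             <voice name="en-US-JennyMultilingualNeural">
--                 <prosody rate="0.8">""")
--
--         # phrase lookup: lowercase source -> (original source, translation); last pair wins
--         phrase_map = {src.lower(): (src, tgt) for src, tgt in word_pairs}
--         # single-word fallback lookup: first pair wins (like a linear scan for the first match)
--         word_map = {}
--         for src, tgt in word_pairs:
--             word_map.setdefault(src.lower(), tgt)
--         # distinct phrase lengths (in words), longest first; empty phrases cannot match anything
--         lengths = sorted({len(k.split()) for k in phrase_map if k.split()}, reverse=True)
--
--         words = sentence.split()
--         n = len(words)
--         index = 0
--         while index < n: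
--             hit = None
--             for length in lengths:
--                 if index + length <= n:
--                     candidate = " ".join(words[index:index + length]).lower()
--                     if candidate in phrase_map:
--                         hit = (length, phrase_map[candidate])
--                         break
--             if hit is not None:
--                 length, (original_phrase, translation) = hit
--                 parts.append(f"""
--                             <lang xml:lang="{lang}">{original_phrase}</lang>
--                             <break time="300ms"/>
--                             <lang xml:lang="es-ES">{translation}</lang>
--                             <break time="500ms"/>""")
--                 index += length
--             else:
--                 original_word = words[index]
--                 translation = word_map.get(original_word.strip(".,!?").lower())
--                 parts.append(f"""
--                     <lang xml:lang="{lang}">{original_word}</lang>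
--                     <break time="300ms"/>""")
--                 if translation:
--                     parts.append(f"""
--                         <lang xml:lang="es-ES">{translation}</lang>
--                         <break time="500ms"/>""")
--                 else:
--                     parts.append("""<break time="500ms"/>""")
--                 index += 1
--
--         parts.append("""
--                     <break time="1000ms"/>
--                 </prosody>
--             </voice>""")
--
--     return "".join(parts)
-- ===== Notes on version B (the rewrite author's own statement) =====
-- stated objective: faster
-- what changed: A's inner loop scans the whole phrase list (sorted longest-first) at every word position and does a second linear scan over word_pairs for the single-word fallback; B indexes the phrases in a dict keyed by the lowercased phrase and, at each position, tries only the distinct phrase lengths in descending order with one dict lookup each, with a prebuilt first-wins dict for the fallback.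
import Mathlib
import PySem

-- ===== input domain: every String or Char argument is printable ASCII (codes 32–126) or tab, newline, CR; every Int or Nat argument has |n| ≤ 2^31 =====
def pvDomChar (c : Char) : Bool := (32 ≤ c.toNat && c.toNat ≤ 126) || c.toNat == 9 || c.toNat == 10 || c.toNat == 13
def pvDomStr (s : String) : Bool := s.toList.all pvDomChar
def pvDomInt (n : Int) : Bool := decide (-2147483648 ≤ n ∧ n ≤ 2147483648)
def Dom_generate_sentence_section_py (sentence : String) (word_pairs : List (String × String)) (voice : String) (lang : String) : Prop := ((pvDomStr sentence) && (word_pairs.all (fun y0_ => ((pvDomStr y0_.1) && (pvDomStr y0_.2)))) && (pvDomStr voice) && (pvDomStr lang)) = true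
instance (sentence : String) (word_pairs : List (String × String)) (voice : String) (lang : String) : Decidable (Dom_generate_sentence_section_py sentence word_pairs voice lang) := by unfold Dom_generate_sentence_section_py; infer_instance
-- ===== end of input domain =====

-- B replaces A's inner scan over every phrase (sorted longest-first) by a single dict lookup per
-- distinct phrase length, descending — an asymptotically smaller inner loop with the same output.

-- ---- helpers shared by both ports: the f-string pieces both Pythons write, and the
-- ---- identical sub-expressions both Pythons compute (phrase dict, word count, candidate phrase)
def pvHead (voice lang sentence : String) : String :=
  "\n        <voice name=\"" ++ voice ++ "\">\n            <prosody rate=\"1.0\">\n                <lang xml:lang=\"" ++ lang ++ "\">" ++ sentence ++ "</lang>\n                <break time=\"1000ms\"/>\n            </prosody>\n        </voice>"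
def pvHdr2 : String :=
  "\n            <voice name=\"en-US-JennyMultilingualNeural\">\n                <prosody rate=\"0.8\">"
def pvPhrasePiece (lang o t : String) : String :=
  "\n                            <lang xml:lang=\"" ++ lang ++ "\">" ++ o ++ "</lang>\n                            <break time=\"300ms\"/>\n                            <lang xml:lang=\"es-ES\">" ++ t ++ "</lang>\n                            <break time=\"500ms\"/>"
def pvWordPiece (lang o : String) : String :=
  "\n                    <lang xml:lang=\"" ++ lang ++ "\">" ++ o ++ "</lang>\n                    <break time=\"300ms\"/>"
def pvTransPiece (t : String) : String :=
  "\n                        <lang xml:lang=\"es-ES\">" ++ t ++ "</lang>\n                        <break time=\"500ms\"/>"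
def pvPause : String := "<break time=\"500ms\"/>"
def pvFoot : String :=
  "\n                    <break time=\"1000ms\"/>\n                </prosody>\n            </voice>"

-- len(k.split())  (number of words of a phrase)
def pvWlen (s : String) : Nat := (PySem.Str.split₀ s).length
-- " ".join(words[i : i+L]).lower()  (the candidate phrase both Pythons build)
def pvCand (words : List String) (i L : Nat) : String :=
  PySem.Str.lower (PySem.Str.join " " (PySem.List.slice words (some (i : Int)) (some ((i + L : Nat) : Int))))
-- {src.lower(): (src, tgt) for src, tgt in word_pairs}  (the dict comprehension both Pythons write)
def pvPM (word_pairs : List (String × String)) : PySem.Dict String (String × String) :=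
  word_pairs.foldl (fun d p => d.insert (PySem.Str.lower p.1) p) PySem.Dict.empty

-- ===== PORT A =====
-- the while loop of A: inner for-with-break = find? over the sorted phrase list
def pvLoopA (words phrases : List String) (pm : PySem.Dict String (String × String))
    (word_pairs : List (String × String)) (lang : String) :
    Nat → Nat → String → String
  | 0, _, ssml => ssml   -- fuel exhausted (Python only loops this far on inputs inside Pre_)
  | fuel+1, index, ssml =>
    if index < words.length then
      match phrases.find? (fun k =>
          decide (index + pvWlen k ≤ words.length) && (pvCand words index (pvWlen k) == k)) with
      | some k =>
          pvLoopA words phrases pm word_pairs lang fuel (index + pvWlen k)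
            (ssml ++ pvPhrasePiece lang (pm.getD k ("", "")).1 (pm.getD k ("", "")).2)
      | none =>
          let ow := words.getD index ""
          let cw := PySem.Str.lower (PySem.Str.stripChars ow ".,!?")
          let tr := (word_pairs.find? (fun p => PySem.Str.lower p.1 == cw)).map (·.2)
          pvLoopA words phrases pm word_pairs lang fuel (index + 1)
            (ssml ++ pvWordPiece lang ow ++
              (match tr with
               | some t => if t == "" then pvPause else pvTransPiece t
               | none => pvPause))
    else ssml

def generate_sentence_section_py (sentence : String) (word_pairs : List (String × String)) (voice : String) (lang : String) : String :=
  if sentence == "" then "" else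
  let ssml := pvHead voice lang sentence
  if word_pairs.isEmpty then ssml else
  let pm := pvPM word_pairs
  let phrases := PySem.List.sorted pm.keys (fun k => pvWlen k) true
  let words := PySem.Str.split₀ sentence
  pvLoopA words phrases pm word_pairs lang words.length 0 (ssml ++ pvHdr2) ++ pvFoot

-- ===== PORT B =====
-- word_map: first pair wins (setdefault loop)
def pvWM (word_pairs : List (String × String)) : PySem.Dict String String :=
  word_pairs.foldl (fun d p => d.setdefault (PySem.Str.lower p.1) p.2) PySem.Dict.empty
-- sorted({len(k.split()) for k in phrase_map if k.split()}, reverse=True)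
def pvLengths (pm : PySem.Dict String (String × String)) : List Nat :=
  PySem.List.sorted
    (PySem.Set.ofList ((pm.keys.filter (fun k => !(PySem.Str.split₀ k).isEmpty)).map pvWlen))
    (fun L => L) true

-- the while loop of B: inner for-with-break over distinct lengths = find? over the length list
def pvLoopB (words : List String) (lengths : List Nat) (pm : PySem.Dict String (String × String))
    (wm : PySem.Dict String String) (lang : String) :
    Nat → Nat → List String → List String
  | 0, _, parts => parts
  | fuel+1, index, parts =>
    if index < words.length then
      match lengths.find? (fun L =>
          decide (index + L ≤ words.length) && pm.contains (pvCand words index L)) with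
      | some L =>
          pvLoopB words lengths pm wm lang fuel (index + L)
            (parts ++ [pvPhrasePiece lang
              (pm.getD (pvCand words index L) ("", "")).1
              (pm.getD (pvCand words index L) ("", "")).2])
      | none =>
          let ow := words.getD index ""
          let tr := wm.get? (PySem.Str.lower (PySem.Str.stripChars ow ".,!?"))
          pvLoopB words lengths pm wm lang fuel (index + 1)
            (parts ++ [pvWordPiece lang ow] ++
              [match tr with
               | some t => if t == "" then pvPause else pvTransPiece t
               | none => pvPause])
    else parts

def generate_sentence_section_py_alt (sentence : String) (word_pairs : List (String × String)) (voice : String) (lang : String) : String :=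
  if sentence == "" then "" else
  let parts := [pvHead voice lang sentence]
  if word_pairs.isEmpty then PySem.Str.join "" parts else
  let pm := pvPM word_pairs
  let wm := pvWM word_pairs
  let lengths := pvLengths pm
  let words := PySem.Str.split₀ sentence
  PySem.Str.join "" (pvLoopB words lengths pm wm lang words.length 0 (parts ++ [pvHdr2]) ++ [pvFoot])

-- ===== PRECONDITION & SPEC =====
-- Pre_ excludes inputs where the sentence has at least one word, word_pairs is nonempty and some
-- source phrase is whitespace-only (or empty): its lowercased key splits into zero words, and A's
-- matcher can then match that key without advancing the word index, so A loops forever whenever the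
-- zero-length phrase is consulted (on the remaining such inputs, where longer phrases always match
-- first, A happens to return and agrees with B).
def Pre_generate_sentence_section_py (sentence : String) (word_pairs : List (String × String)) (voice : String) (lang : String) : Prop :=
  PySem.Str.split₀ sentence = [] ∨ word_pairs = [] ∨
    (word_pairs.all (fun p => p.1.toList.any (fun c => !PySem.Chars.isspace c))) = true
instance (sentence : String) (word_pairs : List (String × String)) (voice : String) (lang : String) : Decidable (Pre_generate_sentence_section_py sentence word_pairs voice lang) := by unfold Pre_generate_sentence_section_py; infer_instance

def pvWitness_generate_sentence_section_py : String × (List (String × String)) × String × String :=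
  ("The cat sat", [("the cat", "el gato"), ("sat", "se sento")], "en-US-Jenny", "en-US")

def Spec_generate_sentence_section_py (sentence : String) (word_pairs : List (String × String)) (voice : String) (lang : String) (out : String) : Prop := out = generate_sentence_section_py_alt sentence word_pairs voice lang
instance (sentence : String) (word_pairs : List (String × String)) (voice : String) (lang : String) (out : String) : Decidable (Spec_generate_sentence_section_py sentence word_pairs voice lang out) := by unfold Spec_generate_sentence_section_py; infer_instance

-- ===== CLAIM (what is proved, stated in full; the proofs are below) =====
def Claim_equal_generate_sentence_section_py : Prop := ∀ (sentence : String) (word_pairs : List (String × String)) (voice : String) (lang : String), Dom_generate_sentence_section_py sentence word_pairs voice lang → Pre_generate_sentence_section_py sentence word_pairs voice lang → Spec_generate_sentence_section_py sentence word_pairs voice lang (generate_sentence_section_py sentence word_pairs voice lang)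

-- ===== LEMMAS AND PROOFS =====

-- lowercasing a character never changes whether it is whitespace
theorem pv_isspace_lowerChar (c : Char) :
    PySem.Chars.isspace (PySem.Chars.lowerChar c) = PySem.Chars.isspace c := by
  unfold PySem.Chars.lowerChar PySem.Chars.isupper
  split
  · next h =>
    simp at h
    obtain ⟨h1, h2⟩ := h
    have hA : 65 ≤ c.toNat := h1
    have hZ : c.toNat ≤ 90 := h2
    have hv : (c.toNat + 32).isValidChar := by constructor; omega
    have ht : (Char.ofNat (c.toNat + 32)).toNat = c.toNat + 32 := by
      rw [Char.toNat_ofNat, if_pos hv]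
    simp [PySem.Chars.isspace, ht]
    rw [Bool.eq_iff_iff]
    simp only [Bool.or_eq_true, Bool.and_eq_true, decide_eq_true_eq]
    omega
  · rfl

-- ---- facts about Python's str.split() (PySem.Chars.split₀.go) ----

-- every word produced by split() is nonempty and whitespace-free
theorem pv_go_words : ∀ (s cur : List Char) (acc : List (List Char)),
    (∀ a ∈ acc, a ≠ [] ∧ ∀ c ∈ a, PySem.Chars.isspace c = false) →
    (∀ c ∈ cur, PySem.Chars.isspace c = false) →
    ∀ w ∈ PySem.Chars.split₀.go s cur acc, w ≠ [] ∧ ∀ c ∈ w, PySem.Chars.isspace c = false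
  | [], cur, acc, hacc, hcur => by
    simp only [PySem.Chars.split₀.go]
    split
    · intro w hw
      exact hacc w (by simpa using hw)
    · next h =>
      intro w hw
      rw [List.mem_reverse, List.mem_cons] at hw
      rcases hw with rfl | hw
      · refine ⟨by simpa [List.isEmpty_eq_false_iff] using h, ?_⟩
        intro c hc
        exact hcur c (List.mem_reverse.mp hc)
      · exact hacc w hw
  | c :: rest, cur, acc, hacc, hcur => by
    simp only [PySem.Chars.split₀.go]
    split
    · split
      · exact pv_go_words rest [] acc hacc (by simp)
      · next h =>
        refine pv_go_words rest [] _ ?_ (by simp)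
        intro a ha
        rcases List.mem_cons.mp ha with rfl | ha
        · refine ⟨by simpa [List.isEmpty_eq_false_iff] using h, ?_⟩
          intro d hd
          exact hcur d (List.mem_reverse.mp hd)
        · exact hacc a ha
    · next h =>
      refine pv_go_words rest (c :: cur) acc hacc ?_
      intro d hd
      rcases List.mem_cons.mp hd with rfl | hd
      · simpa using h
      · exact hcur d hd

theorem pv_split₀_words (cs : List Char) :
    ∀ w ∈ PySem.Chars.split₀ cs, w ≠ [] ∧ ∀ c ∈ w, PySem.Chars.isspace c = false := by
  exact pv_go_words cs [] [] (by simp) (by simp)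

-- split() of a string with a non-whitespace character is nonempty
theorem pv_go_ne_nil : ∀ (s cur : List Char) (acc : List (List Char)),
    (acc ≠ [] ∨ cur ≠ [] ∨ ∃ c ∈ s, PySem.Chars.isspace c = false) →
    PySem.Chars.split₀.go s cur acc ≠ []
  | [], cur, acc, h => by
    simp only [PySem.Chars.split₀.go]
    split
    · next hcur =>
      rcases h with h | h | h
      · simpa using h
      · exact absurd (by simpa [List.isEmpty_iff] using hcur) h
      · simp at h
    · simp
  | c :: rest, cur, acc, h => by
    simp only [PySem.Chars.split₀.go]
    split
    · next hsp =>
      split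
      · next hcur =>
        refine pv_go_ne_nil rest [] acc ?_
        rcases h with h | h | h
        · exact Or.inl h
        · exact absurd (by simpa [List.isEmpty_iff] using hcur) h
        · right; right
          obtain ⟨d, hd, hdn⟩ := h
          rcases List.mem_cons.mp hd with rfl | hd
          · rw [hsp] at hdn; cases hdn
          · exact ⟨d, hd, hdn⟩
      · exact pv_go_ne_nil rest [] _ (Or.inl (by simp))
    · exact pv_go_ne_nil rest (c :: cur) acc (Or.inr (Or.inl (by simp)))

theorem pv_split₀_ne_nil (cs : List Char) (h : ∃ c ∈ cs, PySem.Chars.isspace c = false) :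
    PySem.Chars.split₀ cs ≠ [] :=
  pv_go_ne_nil cs [] [] (Or.inr (Or.inr h))

-- consuming a whitespace-free prefix
theorem pv_go_append : ∀ (w s cur : List Char) (acc : List (List Char)),
    (∀ c ∈ w, PySem.Chars.isspace c = false) →
    PySem.Chars.split₀.go (w ++ s) cur acc = PySem.Chars.split₀.go s (w.reverse ++ cur) acc
  | [], s, cur, acc, _ => by simp
  | c :: w', s, cur, acc, h => by
    simp only [List.cons_append, PySem.Chars.split₀.go]
    rw [if_neg (by simp [h c (by simp)])]
    rw [pv_go_append w' s (c :: cur) acc (fun d hd => h d (by simp [hd]))]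
    simp

theorem pv_intercalate_singleton (sep x : List Char) : List.intercalate sep [x] = x := by
  simp [List.intercalate]

theorem pv_intercalate_cons₂ (sep x y : List Char) (t : List (List Char)) :
    List.intercalate sep (x :: y :: t) = x ++ sep ++ List.intercalate sep (y :: t) := by
  simp [List.intercalate, List.intersperse]

-- split() is a left inverse of " ".join on lists of nonempty whitespace-free words
theorem pv_go_intercalate : ∀ (ws : List (List Char)) (acc : List (List Char)),
    (∀ w ∈ ws, w ≠ [] ∧ ∀ c ∈ w, PySem.Chars.isspace c = false) → ws ≠ [] →
    PySem.Chars.split₀.go (List.intercalate [' '] ws) [] acc = acc.reverse ++ ws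
  | [], _, _, hne => absurd rfl hne
  | [w], acc, h, _ => by
    rw [pv_intercalate_singleton]
    rw [show w = w ++ [] by simp, pv_go_append w [] [] acc (h w (by simp)).2]
    simp only [PySem.Chars.split₀.go]
    rw [if_neg (by simpa [List.isEmpty_iff] using (h w (by simp)).1)]
    simp
  | w :: w' :: t, acc, h, _ => by
    rw [pv_intercalate_cons₂, List.append_assoc,
        pv_go_append w _ [] acc (h w (by simp)).2]
    simp only [List.singleton_append, PySem.Chars.split₀.go]
    rw [if_pos (by decide)]
    rw [if_neg (by simpa [List.isEmpty_iff] using (h w (by simp)).1)]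
    simp only [List.append_nil, List.reverse_reverse]
    rw [pv_go_intercalate (w' :: t) (w :: acc) (fun u hu => h u (by simp [hu])) (by simp)]
    simp

theorem pv_split₀_intercalate (ws : List (List Char))
    (h : ∀ w ∈ ws, w ≠ [] ∧ ∀ c ∈ w, PySem.Chars.isspace c = false) :
    PySem.Chars.split₀ (List.intercalate [' '] ws) = ws := by
  cases ws with
  | nil => rfl
  | cons w t =>
    exact pv_go_intercalate (w :: t) [] h (by simp)

theorem pv_map_intercalate (f : Char → Char) (sep : List Char) :
    ∀ (l : List (List Char)),
    List.map f (List.intercalate sep l) = List.intercalate (sep.map f) (l.map (List.map f))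
  | [] => by simp [List.intercalate]
  | [x] => by simp [pv_intercalate_singleton]
  | x :: y :: t => by
    simp only [List.map_cons]
    rw [pv_intercalate_cons₂, pv_intercalate_cons₂, List.map_append, List.map_append,
        pv_map_intercalate f sep (y :: t), List.map_cons]

-- ---- word-count facts ----

theorem pv_wlen_toList (s : String) : pvWlen s = (PySem.Chars.split₀ s.toList).length := by
  rw [pvWlen, ← PySem.Str.split₀_map_toList, List.length_map]

-- the lowercased key of a source phrase with a non-whitespace character has at least one word
theorem pv_wlen_lower_pos (s : String) (h : ∃ c ∈ s.toList, PySem.Chars.isspace c = false) :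
    0 < pvWlen (PySem.Str.lower s) := by
  rw [pv_wlen_toList, PySem.Str.toList_lower]
  obtain ⟨c, hc, hcn⟩ := h
  have hne : PySem.Chars.split₀ (PySem.Chars.lower s.toList) ≠ [] := by
    apply pv_split₀_ne_nil
    refine ⟨PySem.Chars.lowerChar c, ?_, by rw [pv_isspace_lowerChar]; exact hcn⟩
    rw [PySem.Chars.lower]
    exact List.mem_map_of_mem hc
  exact List.length_pos_of_ne_nil hne

-- all words of the sentence are nonempty and whitespace-free
theorem pv_words_sentence (sentence : String) :
    ∀ w ∈ PySem.Str.split₀ sentence, w.toList ≠ [] ∧ ∀ c ∈ w.toList, PySem.Chars.isspace c = false := by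
  intro w hw
  have : w.toList ∈ PySem.Chars.split₀ sentence.toList := by
    rw [← PySem.Str.split₀_map_toList]
    exact List.mem_map_of_mem hw
  exact pv_split₀_words sentence.toList w.toList this

-- the candidate built from L words of the sentence has exactly L words
theorem pv_wlen_cand (words : List String)
    (hwords : ∀ w ∈ words, w.toList ≠ [] ∧ ∀ c ∈ w.toList, PySem.Chars.isspace c = false)
    (i L : Nat) (hL : 0 < L) (hfit : i + L ≤ words.length) :
    pvWlen (pvCand words i L) = L := by
  rw [pvCand, PySem.List.slice_natCast, Nat.add_sub_cancel_left]
  set ws := List.take L (List.drop i words) with hws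
  have hmem : ∀ w ∈ ws, w ∈ words := fun w hw => List.mem_of_mem_drop (List.mem_of_mem_take hw)
  have hlen : ws.length = L := by
    rw [hws, List.length_take, List.length_drop]
    omega
  rw [pv_wlen_toList, PySem.Str.toList_lower, PySem.Str.toList_join]
  show (PySem.Chars.split₀ (PySem.Chars.lower (PySem.Chars.join (" ").toList (ws.map String.toList)))).length = L
  have hsep : (" " : String).toList = [' '] := by decide
  rw [PySem.Chars.lower, PySem.Chars.join, hsep]
  rw [pv_map_intercalate]
  have hsep2 : [' '].map PySem.Chars.lowerChar = [' '] := by decide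
  rw [hsep2]
  rw [pv_split₀_intercalate]
  · simp [hlen]
  · intro w hw
    simp only [List.mem_map] at hw
    obtain ⟨v, hv, rfl⟩ := hw
    obtain ⟨u, hu, rfl⟩ := hv
    obtain ⟨h1, h2⟩ := hwords u (hmem u hu)
    refine ⟨by simpa using h1, ?_⟩
    intro c hc
    obtain ⟨d, hd, rfl⟩ := List.mem_map.mp hc
    rw [pv_isspace_lowerChar]
    exact h2 d hd

-- ---- dict facts ----

theorem pv_pm_keys (wps : List (String × String)) :
    (pvPM wps).keys = PySem.Set.ofList (wps.map (fun p => PySem.Str.lower p.1)) := by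
  rw [pvPM, PySem.Dict.keys_foldl_insert_key wps (fun p => PySem.Str.lower p.1) (fun _ p => p)
        PySem.Dict.empty, PySem.Dict.keys_empty, PySem.Set.update_nil_left]

theorem pv_mem_pm_keys (wps : List (String × String)) (k : String) :
    k ∈ (pvPM wps).keys ↔ ∃ p ∈ wps, PySem.Str.lower p.1 = k := by
  rw [pv_pm_keys, PySem.Set.mem_ofList]
  simp

-- under Pre_, every key of the phrase dict has at least one word
theorem pv_keys_wlen_pos (wps : List (String × String))
    (hpre : (wps.all (fun p => p.1.toList.any (fun c => !PySem.Chars.isspace c))) = true) :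
    ∀ k ∈ (pvPM wps).keys, 0 < pvWlen k := by
  intro k hk
  obtain ⟨p, hp, rfl⟩ := (pv_mem_pm_keys wps k).mp hk
  have := List.all_eq_true.mp hpre p hp
  obtain ⟨c, hc, hcn⟩ := List.any_eq_true.mp this
  exact pv_wlen_lower_pos p.1 ⟨c, hc, by simpa using hcn⟩

-- the setdefault loop looks up the FIRST matching pair, like A's linear scan
theorem pv_wm_get_aux (w : String) : ∀ (wps : List (String × String)) (d : PySem.Dict String String),
    (wps.foldl (fun d p => d.setdefault (PySem.Str.lower p.1) p.2) d).get? w =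
      ((d.get? w).or ((wps.find? (fun p => PySem.Str.lower p.1 == w)).map (·.2)))
  | [], d => by simp
  | p :: rest, d => by
    rw [List.foldl_cons, pv_wm_get_aux w rest (d.setdefault (PySem.Str.lower p.1) p.2)]
    by_cases hk : PySem.Str.lower p.1 = w
    · rw [List.find?_cons_of_pos (by simpa using hk)]
      subst hk
      rw [PySem.Dict.get?_setdefault_self]
      cases hd : d.get? (PySem.Str.lower p.1) <;> simp_all
    · rw [List.find?_cons_of_neg (by simpa using hk)]
      rw [PySem.Dict.get?_setdefault_of_ne d p.2 (fun h => hk h.symm)]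

theorem pv_wm_get (wps : List (String × String)) (w : String) :
    (pvWM wps).get? w = (wps.find? (fun p => PySem.Str.lower p.1 == w)).map (·.2) := by
  rw [pvWM, pv_wm_get_aux w wps PySem.Dict.empty, PySem.Dict.get?_empty, Option.none_or]

-- ---- find? on a descending list ----

theorem pv_find_max {α : Type} (f : α → Nat) : ∀ (xs : List α),
    xs.Pairwise (fun a b => f b ≤ f a) → ∀ (p : α → Bool) (b : α),
    xs.find? p = some b → ∀ x ∈ xs, p x = true → f x ≤ f b
  | [], _, p, b, hf => by simp at hf
  | a :: t, hp, p, b, hf => by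
    rw [List.pairwise_cons] at hp
    intro x hx hpx
    by_cases hpa : p a = true
    · rw [List.find?_cons_of_pos hpa] at hf
      injection hf with hf; subst hf
      rcases List.mem_cons.mp hx with rfl | hx
      · exact le_refl _
      · exact hp.1 x hx
    · rw [List.find?_cons_of_neg hpa] at hf
      rcases List.mem_cons.mp hx with rfl | hx
      · exact absurd hpx hpa
      · exact pv_find_max f t hp.2 p b hf x hx hpx

theorem pv_find_sel {α : Type} (f : α → Nat) : ∀ (xs : List α),
    xs.Pairwise (fun a b => f b ≤ f a) → ∀ (p : α → Bool) (b : α), b ∈ xs → p b = true →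
    (∀ x ∈ xs, p x = true → f x ≤ f b) → (∀ x ∈ xs, p x = true → f x = f b → x = b) →
    xs.find? p = some b
  | [], _, p, b, hb, _, _, _ => by simp at hb
  | a :: t, hp, p, b, hb, hpb, hmax, huni => by
    rw [List.pairwise_cons] at hp
    by_cases hpa : p a = true
    · rw [List.find?_cons_of_pos hpa]
      have : a = b := by
        rcases List.mem_cons.mp hb with rfl | hbt
        · rfl
        · exact huni a (by simp) hpa (le_antisymm (hmax a (by simp) hpa) (hp.1 b hbt))
      rw [this]
    · rw [List.find?_cons_of_neg hpa]
      rcases List.mem_cons.mp hb with rfl | hbt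
      · exact absurd hpb hpa
      · exact pv_find_sel f t hp.2 p b hbt hpb
          (fun x hx => hmax x (by simp [hx]))
          (fun x hx => huni x (by simp [hx]))

-- ---- the length list of B ----

theorem pv_mem_lengths (pm : PySem.Dict String (String × String)) (L : Nat) :
    L ∈ pvLengths pm ↔ ∃ k ∈ pm.keys, 0 < pvWlen k ∧ pvWlen k = L := by
  rw [pvLengths, PySem.List.mem_sorted, PySem.Set.mem_ofList]
  simp only [List.mem_map, List.mem_filter]
  constructor
  · rintro ⟨k, ⟨hk, hne⟩, rfl⟩
    refine ⟨k, hk, ?_, rfl⟩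
    rw [pvWlen]
    simp only [Bool.not_eq_eq_eq_not, Bool.not_true, List.isEmpty_eq_false_iff] at hne
    exact List.length_pos_of_ne_nil hne
  · rintro ⟨k, hk, hpos, rfl⟩
    refine ⟨k, ⟨hk, ?_⟩, rfl⟩
    rw [pvWlen] at hpos
    simp only [Bool.not_eq_eq_eq_not, Bool.not_true, List.isEmpty_eq_false_iff]
    exact List.ne_nil_of_length_pos hpos

theorem pv_lengths_pairwise (pm : PySem.Dict String (String × String)) :
    (pvLengths pm).Pairwise (fun a b => b ≤ a) := by
  rw [pvLengths]
  exact PySem.List.sorted_pairwise_rev _ (fun L => L)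

-- ---- the central matching lemma: A's scan over all phrases (longest first) finds exactly
-- ---- what B's lookup over distinct lengths (descending) finds ----

set_option maxHeartbeats 1000000 in
theorem pv_match (words : List String) (wps : List (String × String)) (i : Nat)
    (hwords : ∀ w ∈ words, w.toList ≠ [] ∧ ∀ c ∈ w.toList, PySem.Chars.isspace c = false)
    (hk3 : ∀ k ∈ (pvPM wps).keys, 0 < pvWlen k) :
    ((pvLengths (pvPM wps)).find? (fun L =>
        decide (i + L ≤ words.length) && (pvPM wps).contains (pvCand words i L)) = none ∧
      (PySem.List.sorted (pvPM wps).keys (fun k => pvWlen k) true).find? (fun k =>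
        decide (i + pvWlen k ≤ words.length) && (pvCand words i (pvWlen k) == k)) = none) ∨
    (∃ L, (pvLengths (pvPM wps)).find? (fun L =>
        decide (i + L ≤ words.length) && (pvPM wps).contains (pvCand words i L)) = some L ∧
      (PySem.List.sorted (pvPM wps).keys (fun k => pvWlen k) true).find? (fun k =>
        decide (i + pvWlen k ≤ words.length) && (pvCand words i (pvWlen k) == k)) =
          some (pvCand words i L) ∧
      pvWlen (pvCand words i L) = L) := by
  cases hB : (pvLengths (pvPM wps)).find? (fun L =>
      decide (i + L ≤ words.length) && (pvPM wps).contains (pvCand words i L)) with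
  | none =>
    left
    refine ⟨rfl, List.find?_eq_none.mpr ?_⟩
    intro k hk hpk
    simp only [Bool.and_eq_true, decide_eq_true_eq, beq_iff_eq] at hpk
    obtain ⟨hfit, hceq⟩ := hpk
    have hkk : k ∈ (pvPM wps).keys := (PySem.List.mem_sorted _ _ _ _).mp hk
    have hLmem : pvWlen k ∈ pvLengths (pvPM wps) :=
      (pv_mem_lengths (pvPM wps) _).mpr ⟨k, hkk, hk3 k hkk, rfl⟩
    refine List.find?_eq_none.mp hB _ hLmem ?_
    simp only [Bool.and_eq_true, decide_eq_true_eq]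
    refine ⟨hfit, (PySem.Dict.contains_iff_mem_keys (pvPM wps) _).mpr ?_⟩
    rw [hceq]
    exact hkk
  | some L =>
    right
    have hpBL := List.find?_some hB
    simp only [Bool.and_eq_true, decide_eq_true_eq] at hpBL
    obtain ⟨hfit, hcont⟩ := hpBL
    have hckeys : pvCand words i L ∈ (pvPM wps).keys :=
      (PySem.Dict.contains_iff_mem_keys (pvPM wps) _).mp hcont
    obtain ⟨k0, _, hk0pos, hk0len⟩ :=
      (pv_mem_lengths (pvPM wps) L).mp (List.mem_of_find?_eq_some hB)
    have hLpos : 0 < L := hk0len ▸ hk0pos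
    have hwl : pvWlen (pvCand words i L) = L := pv_wlen_cand words hwords i L hLpos hfit
    refine ⟨L, rfl, ?_, hwl⟩
    apply pv_find_sel (fun k => pvWlen k) _
      (PySem.List.sorted_pairwise_rev _ _) _ (pvCand words i L)
      ((PySem.List.mem_sorted _ _ _ _).mpr hckeys)
    · simp only [Bool.and_eq_true, decide_eq_true_eq, beq_iff_eq, hwl]
      exact ⟨hfit, trivial⟩
    · intro x hx hpx
      simp only [Bool.and_eq_true, decide_eq_true_eq, beq_iff_eq] at hpx
      obtain ⟨hxfit, hxeq⟩ := hpx
      have hxk : x ∈ (pvPM wps).keys := (PySem.List.mem_sorted _ _ _ _).mp hx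
      have hxpos : 0 < pvWlen x := hk3 x hxk
      have hxLmem : pvWlen x ∈ pvLengths (pvPM wps) :=
        (pv_mem_lengths (pvPM wps) _).mpr ⟨x, hxk, hxpos, rfl⟩
      have hle : pvWlen x ≤ L :=
        pv_find_max (fun L => L) (pvLengths (pvPM wps)) (pv_lengths_pairwise (pvPM wps)) _ L hB
          (pvWlen x) hxLmem (by
            simp only [Bool.and_eq_true, decide_eq_true_eq]
            refine ⟨hxfit, (PySem.Dict.contains_iff_mem_keys (pvPM wps) _).mpr ?_⟩
            rw [hxeq]
            exact hxk)
      rw [hwl]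
      exact hle
    · intro x hx hpx hlen
      simp only [Bool.and_eq_true, decide_eq_true_eq, beq_iff_eq] at hpx
      rw [hwl] at hlen
      rw [← hpx.2, hlen]

-- ---- "".join facts ----

theorem pv_join_nil : PySem.Str.join "" [] = "" := by
  apply String.toList_inj.mp
  rw [PySem.Str.toList_join]
  simp [PySem.Chars.join, List.intercalate]

theorem pv_join_cons (x : String) (xs : List String) :
    PySem.Str.join "" (x :: xs) = x ++ PySem.Str.join "" xs := by
  apply String.toList_inj.mp
  rw [PySem.Str.toList_join, String.toList_append, PySem.Str.toList_join]
  simp only [List.map_cons, PySem.Chars.join]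
  cases xs with
  | nil => simp [List.intercalate]
  | cons y t =>
    have h0 : (("" : String).toList) = [] := by decide
    rw [h0]
    simp only [List.map_cons]
    rw [pv_intercalate_cons₂]
    simp

theorem pv_join_singleton (x : String) : PySem.Str.join "" [x] = x := by
  rw [pv_join_cons, pv_join_nil, String.append_empty]

theorem pv_join_append_singleton (xs : List String) (x : String) :
    PySem.Str.join "" (xs ++ [x]) = PySem.Str.join "" xs ++ x := by
  induction xs with
  | nil => rw [List.nil_append, pv_join_singleton, pv_join_nil, String.empty_append]
  | cons y t ih =>
    rw [List.cons_append, pv_join_cons, ih, pv_join_cons, String.append_assoc]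

-- ---- the two loops agree step for step ----

theorem pv_loop_eq (words : List String) (wps : List (String × String)) (lang : String)
    (hwords : ∀ w ∈ words, w.toList ≠ [] ∧ ∀ c ∈ w.toList, PySem.Chars.isspace c = false)
    (hk3 : ∀ k ∈ (pvPM wps).keys, 0 < pvWlen k) :
    ∀ (fuel i : Nat) (parts : List String),
    pvLoopA words (PySem.List.sorted (pvPM wps).keys (fun k => pvWlen k) true) (pvPM wps) wps lang
        fuel i (PySem.Str.join "" parts) =
      PySem.Str.join "" (pvLoopB words (pvLengths (pvPM wps)) (pvPM wps) (pvWM wps) lang fuel i parts)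
  | 0, i, parts => rfl
  | fuel+1, i, parts => by
    by_cases hi : i < words.length
    · rcases pv_match words wps i hwords hk3 with ⟨hBn, hAn⟩ | ⟨L, hBs, hAs, hwl⟩
      · -- no phrase matches: both fall back to the single word
        simp only [pvLoopA, pvLoopB, if_pos hi, hBn, hAn]
        have htr : (pvWM wps).get? (PySem.Str.lower (PySem.Str.stripChars (words.getD i "") ".,!?")) =
            (wps.find? (fun p => PySem.Str.lower p.1 ==
              PySem.Str.lower (PySem.Str.stripChars (words.getD i "") ".,!?"))).map (·.2) :=
          pv_wm_get wps _
        rw [htr]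
        rw [show ∀ (a b : String),
          PySem.Str.join "" parts ++ a ++ b = PySem.Str.join "" (parts ++ [a] ++ [b]) from
          fun a b => by rw [pv_join_append_singleton, pv_join_append_singleton]]
        exact pv_loop_eq words wps lang hwords hk3 fuel (i+1) (parts ++ [_] ++ [_])
      · -- a phrase matches: same key, same advance
        simp only [pvLoopA, pvLoopB, if_pos hi, hBs, hAs, hwl]
        rw [show ∀ (a : String),
          PySem.Str.join "" parts ++ a = PySem.Str.join "" (parts ++ [a]) from
          fun a => by rw [pv_join_append_singleton]]
        exact pv_loop_eq words wps lang hwords hk3 fuel (i+L) (parts ++ [_])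
    · simp only [pvLoopA, pvLoopB, if_neg hi]

-- ===== VERDICT (by name: the statement is the Claim_ definition above) =====
theorem generate_sentence_section_py_spec : Claim_equal_generate_sentence_section_py := by
  intro sentence word_pairs voice lang _hdom hpre
  unfold Pre_generate_sentence_section_py at hpre
  unfold Spec_generate_sentence_section_py
  unfold generate_sentence_section_py generate_sentence_section_py_alt
  by_cases hs : sentence == ""
  · simp [hs]
  · simp only [hs, Bool.false_eq_true, if_false]
    by_cases hwp : word_pairs.isEmpty
    · simp [hwp, pv_join_singleton]
    · simp only [hwp, Bool.false_eq_true, if_false]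
      have h0 : pvHead voice lang sentence ++ pvHdr2 =
          PySem.Str.join "" ([pvHead voice lang sentence] ++ [pvHdr2]) := by
        rw [pv_join_append_singleton, pv_join_singleton]
      have hpre' : PySem.Str.split₀ sentence = [] ∨
          (word_pairs.all (fun p => p.1.toList.any (fun c => !PySem.Chars.isspace c))) = true := by
        cases hpre with
        | inl h => exact Or.inl h
        | inr h2 =>
          cases h2 with
          | inl h => exact absurd h (by simpa [List.isEmpty_iff] using hwp)
          | inr h => exact Or.inr h
      rcases hpre' with hnil | hall
      · rw [hnil, h0]
        exact (pv_join_append_singleton ([pvHead voice lang sentence] ++ [pvHdr2]) pvFoot).symm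
      · have hwords := pv_words_sentence sentence
        have hk3 := pv_keys_wlen_pos word_pairs hall
        rw [h0, pv_loop_eq (PySem.Str.split₀ sentence) word_pairs lang hwords hk3
              (PySem.Str.split₀ sentence).length 0 ([pvHead voice lang sentence] ++ [pvHdr2]),
            ← pv_join_append_singleton]
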